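-- pv_equiv track=rewrite | github.com/W3villa-AmitS/image | api/jobs/task_scheduler.py | _get_next_task_type
-- ===== SOURCE A (Python) =====
-- def _get_next_task_type(completed_tasks, initial_qats, number_of_wots, qat_frequency):
--     """
--     Todo:
--     :param completed_tasks:
--     :param initial_qats:
--     :param number_of_wots:
--     :param qat_frequency:
--     :return:
--     """
--     order = ""
--
--     # add initial QATs
--     for i in range(initial_qats):
--         order += 'Q'
--
--     # add some WOTS
--     for i in range(1, number_of_wots + 1):
--         order += 'W'
--
--         # add intermittent QATs
--         if i % qat_frequency == 0:
--             order += "Q"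
--
--     # remove any QAT if scheduled at the end of the order
--     if order.endswith('Q'):
--         order = order[:-1]
--
--     if completed_tasks < len(order):
--         return order[completed_tasks]
--     return None
-- ===== SOURCE B (Python) =====
-- def _get_next_task_type(completed_tasks, initial_qats, number_of_wots, qat_frequency):
--     # O(1): locate the scheduled-task character arithmetically instead of building the string.
--     qats = max(initial_qats, 0)
--     wots = max(number_of_wots, 0)
--     if wots == 0:
--         length = qats - 1 if qats > 0 else 0
--         return 'Q' if 0 <= completed_tasks < length else None
--     period = abs(qat_frequency)
--     length = qats + wots + wots // period - (1 if wots % period == 0 else 0)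
--     if not (0 <= completed_tasks < length):
--         return None
--     if completed_tasks < qats:
--         return 'Q'
--     return 'Q' if (completed_tasks - qats) % (period + 1) == period else 'W'
-- ===== Notes on version B (the rewrite author's own statement) =====
-- stated objective: faster
-- what changed: B computes the schedule length and the character at the requested index by closed-form arithmetic (prefix of Qs, then periodic blocks of qat_frequency Ws followed by a Q, minus a stripped trailing Q) instead of building the whole schedule string character by character.
-- intended difference: For negative completed_tasks that are within range of the schedule, A returns a character through Python's accidental negative-index wraparound in order[completed_tasks]; B returns None, the intended answer for an index that is not a valid completed-task count. — e.g. on _get_next_task_type(-1, 2, 0, 1): A returns some "Q", B returns none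
import Mathlib
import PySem

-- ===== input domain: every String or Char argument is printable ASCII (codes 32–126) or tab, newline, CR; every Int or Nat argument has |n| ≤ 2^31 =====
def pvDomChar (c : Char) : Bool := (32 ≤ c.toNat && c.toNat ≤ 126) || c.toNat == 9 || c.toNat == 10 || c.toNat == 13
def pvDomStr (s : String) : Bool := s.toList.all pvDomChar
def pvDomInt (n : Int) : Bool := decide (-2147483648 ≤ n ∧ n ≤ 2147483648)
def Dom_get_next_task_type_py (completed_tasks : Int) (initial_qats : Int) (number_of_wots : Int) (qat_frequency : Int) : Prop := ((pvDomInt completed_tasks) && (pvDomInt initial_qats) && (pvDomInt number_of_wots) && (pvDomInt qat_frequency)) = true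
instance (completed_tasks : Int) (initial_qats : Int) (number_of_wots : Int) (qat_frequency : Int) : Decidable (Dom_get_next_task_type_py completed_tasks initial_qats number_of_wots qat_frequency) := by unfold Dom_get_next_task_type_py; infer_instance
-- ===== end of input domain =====

-- B replaces A's character-by-character string construction by O(1) closed-form arithmetic;
-- on in-range negative completed_tasks A's negative-index wraparound returns a char, B returns none (see D_).
-- ===== PORT A =====
-- A-side helper: the schedule string A builds (order as a List Char), exactly A's three construction steps.
def pvOrderA (initial_qats : Int) (number_of_wots : Int) (qat_frequency : Int) : List Char :=
  -- order = ""; for i in range(initial_qats): order += 'Q'   (Array.push = O(1) string append)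
  let order : Array Char := (PySem.List.pyRange 0 initial_qats 1).foldl (fun o _ => o.push 'Q') #[]
  -- for i in range(1, number_of_wots + 1): order += 'W'; if i % qat_frequency == 0: order += 'Q'
  let order := (PySem.List.pyRange 1 (number_of_wots + 1) 1).foldl
    (fun o i =>
      let o := o.push 'W'
      if PySem.Int.mod i qat_frequency = 0 then o.push 'Q' else o) order
  let order := order.toList
  -- if order.endswith('Q'): order = order[:-1]
  if PySem.Chars.endswith order ['Q'] then PySem.List.slice order none (some (-1)) else order

def get_next_task_type_py (completed_tasks : Int) (initial_qats : Int) (number_of_wots : Int) (qat_frequency : Int) : Option String :=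
  let order := pvOrderA initial_qats number_of_wots qat_frequency
  -- if completed_tasks < len(order): return order[completed_tasks]  (a one-char string); return None
  if completed_tasks < (order.length : Int) then
    (PySem.List.pyGet? order completed_tasks).map (fun c => String.ofList [c])
  else none

-- ===== PORT B =====
def get_next_task_type_py_alt (completed_tasks : Int) (initial_qats : Int) (number_of_wots : Int) (qat_frequency : Int) : Option String :=
  let qats := max initial_qats 0
  let wots := max number_of_wots 0
  if wots = 0 then
    let length := if qats > 0 then qats - 1 else 0
    if 0 ≤ completed_tasks ∧ completed_tasks < length then some "Q" else none
  else
    let period := |qat_frequency|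
    let length := qats + wots + PySem.Int.floordiv wots period -
      (if PySem.Int.mod wots period = 0 then 1 else 0)
    if ¬ (0 ≤ completed_tasks ∧ completed_tasks < length) then none
    else if completed_tasks < qats then some "Q"
    else if PySem.Int.mod (completed_tasks - qats) (period + 1) = period then some "Q" else some "W"

-- ===== PRECONDITION & SPEC =====
-- closed-form length of A's final schedule (used only by Pre_)
def pvLen (initial_qats : Int) (number_of_wots : Int) (qat_frequency : Int) : Int :=
  if max number_of_wots 0 = 0 then max (max initial_qats 0 - 1) 0
  else max initial_qats 0 + max number_of_wots 0 +
    Int.ediv (max number_of_wots 0) |qat_frequency| -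
    (if Int.emod (max number_of_wots 0) |qat_frequency| = 0 then 1 else 0)

-- Pre_ excludes exactly the inputs where A raises: ZeroDivisionError (number_of_wots ≥ 1 with
-- qat_frequency = 0) and IndexError (completed_tasks below -len(order)).
def Pre_get_next_task_type_py (completed_tasks : Int) (initial_qats : Int) (number_of_wots : Int) (qat_frequency : Int) : Prop :=
  (1 ≤ number_of_wots → qat_frequency ≠ 0) ∧
  -(pvLen initial_qats number_of_wots qat_frequency) ≤ completed_tasks
instance (completed_tasks : Int) (initial_qats : Int) (number_of_wots : Int) (qat_frequency : Int) : Decidable (Pre_get_next_task_type_py completed_tasks initial_qats number_of_wots qat_frequency) := by unfold Pre_get_next_task_type_py; infer_instance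
def pvWitness_get_next_task_type_py : Int × Int × Int × Int := (0, 1, 2, 1)

-- On in-range negative completed_tasks A returns a character via Python's accidental negative-index
-- wraparound; B returns none, the intended answer for an index that is not a valid task count.
def D_get_next_task_type_py (completed_tasks : Int) (initial_qats : Int) (number_of_wots : Int) (qat_frequency : Int) : Prop :=
  completed_tasks < 0
instance (completed_tasks : Int) (initial_qats : Int) (number_of_wots : Int) (qat_frequency : Int) : Decidable (D_get_next_task_type_py completed_tasks initial_qats number_of_wots qat_frequency) := by unfold D_get_next_task_type_py; infer_instance

def Spec_get_next_task_type_py (completed_tasks : Int) (initial_qats : Int) (number_of_wots : Int) (qat_frequency : Int) (out : Option String) : Prop := ¬ D_get_next_task_type_py completed_tasks initial_qats number_of_wots qat_frequency → out = get_next_task_type_py_alt completed_tasks initial_qats number_of_wots qat_frequency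
instance (completed_tasks : Int) (initial_qats : Int) (number_of_wots : Int) (qat_frequency : Int) (out : Option String) : Decidable (Spec_get_next_task_type_py completed_tasks initial_qats number_of_wots qat_frequency out) := by unfold Spec_get_next_task_type_py; infer_instance

def pvDiffWitness_get_next_task_type_py : Int × Int × Int × Int := (-1, 2, 0, 1)
def pvDiffWitnessOut_get_next_task_type_py : (Option String) × (Option String) := (some "Q", none)

-- ===== CLAIM (what is proved, stated in full; the proofs are below) =====
def Claim_unchanged_get_next_task_type_py : Prop := ∀ (completed_tasks : Int) (initial_qats : Int) (number_of_wots : Int) (qat_frequency : Int), Dom_get_next_task_type_py completed_tasks initial_qats number_of_wots qat_frequency → Pre_get_next_task_type_py completed_tasks initial_qats number_of_wots qat_frequency → Spec_get_next_task_type_py completed_tasks initial_qats number_of_wots qat_frequency (get_next_task_type_py completed_tasks initial_qats number_of_wots qat_frequency)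
def Claim_changed_get_next_task_type_py : Prop := Dom_get_next_task_type_py (pvDiffWitness_get_next_task_type_py.1) (pvDiffWitness_get_next_task_type_py.2.1) (pvDiffWitness_get_next_task_type_py.2.2.1) (pvDiffWitness_get_next_task_type_py.2.2.2) ∧ Pre_get_next_task_type_py (pvDiffWitness_get_next_task_type_py.1) (pvDiffWitness_get_next_task_type_py.2.1) (pvDiffWitness_get_next_task_type_py.2.2.1) (pvDiffWitness_get_next_task_type_py.2.2.2) ∧ D_get_next_task_type_py (pvDiffWitness_get_next_task_type_py.1) (pvDiffWitness_get_next_task_type_py.2.1) (pvDiffWitness_get_next_task_type_py.2.2.1) (pvDiffWitness_get_next_task_type_py.2.2.2) ∧ get_next_task_type_py (pvDiffWitness_get_next_task_type_py.1) (pvDiffWitness_get_next_task_type_py.2.1) (pvDiffWitness_get_next_task_type_py.2.2.1) (pvDiffWitness_get_next_task_type_py.2.2.2) = pvDiffWitnessOut_get_next_task_type_py.1 ∧ get_next_task_type_py_alt (pvDiffWitness_get_next_task_type_py.1) (pvDiffWitness_get_next_task_type_py.2.1) (pvDiffWitness_get_next_task_type_py.2.2.1) (pvDiffWitness_get_next_task_type_py.2.2.2)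 = pvDiffWitnessOut_get_next_task_type_py.2 ∧ pvDiffWitnessOut_get_next_task_type_py.1 ≠ pvDiffWitnessOut_get_next_task_type_py.2
def Claim_exact_get_next_task_type_py : Prop := ∀ (completed_tasks : Int) (initial_qats : Int) (number_of_wots : Int) (qat_frequency : Int), Dom_get_next_task_type_py completed_tasks initial_qats number_of_wots qat_frequency → Pre_get_next_task_type_py completed_tasks initial_qats number_of_wots qat_frequency → D_get_next_task_type_py completed_tasks initial_qats number_of_wots qat_frequency → get_next_task_type_py completed_tasks initial_qats number_of_wots qat_frequency ≠ get_next_task_type_py_alt completed_tasks initial_qats number_of_wots qat_frequency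

-- ===== LEMMAS AND PROOFS =====

theorem pvLen_pos (I0 W0 q : Int) (hW : 0 < W0) (W a : Nat)
    (hWeq : W0 = (W : Int)) (haq : q.natAbs = a) :
    pvLen I0 W0 q = (I0.toNat : Int) + W + ((W / a : Nat) : Int) - (if a ∣ W then 1 else 0) := by
  have habs : |q| = (a : Int) := by rw [Int.abs_eq_natAbs, haq]
  have he : Int.ediv (W : Int) ((a : Nat) : Int) = ((W / a : Nat) : Int) := by
    exact_mod_cast rfl
  have hm : Int.emod (W : Int) ((a : Nat) : Int) = ((W % a : Nat) : Int) := by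
    exact_mod_cast rfl
  unfold pvLen
  rw [if_neg (by omega), show max W0 0 = (W : Int) by omega,
    show max I0 0 = (I0.toNat : Int) by omega, habs, he, hm]
  have : ((W % a : Nat) : Int) = 0 ↔ a ∣ W := by
    rw [show ((0:Int) = ((0:Nat):Int)) from rfl, Int.natCast_inj]
    exact ⟨fun h => Nat.dvd_of_mod_eq_zero h, fun h => Nat.mod_eq_zero_of_dvd h⟩
  split_ifs with h1 h2 h2 <;> first | rfl | (exfalso; tauto)

def wotsN (a : Nat) : Nat → List Char
  | 0 => []
  | n + 1 => wotsN a n ++ ('W' :: (if a ∣ (n + 1) then ['Q'] else []))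
theorem foldQ_eq (l : List Int) (init : Array Char) :
    (l.foldl (fun o _ => o.push 'Q') init).toList = init.toList ++ List.replicate l.length 'Q' := by
  induction l generalizing init with
  | nil => simp
  | cons x xs ih => simp [List.foldl, ih, List.replicate_succ]
theorem foldW_eq (q : Int) (n : Nat) (init : Array Char) :
    ((PySem.List.pyRange 1 ((n : Int) + 1) 1).foldl
      (fun o i => let o := o.push 'W'; if PySem.Int.mod i q = 0 then o.push 'Q' else o) init).toList
    = init.toList ++ wotsN q.natAbs n := by
  induction n generalizing init with
  | zero => simp [PySem.List.pyRange_one_eq_nil, wotsN]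
  | succ m ih =>
    have hc : ((m + 1 : Nat) : Int) + 1 = ((m : Int) + 1) + 1 := by push_cast; ring
    rw [hc, PySem.List.pyRange_one_succ_right (by omega), List.foldl_append, wotsN]
    have hmod : PySem.Int.mod ((m : Int) + 1) q = 0 ↔ q.natAbs ∣ (m + 1) := by
      rw [PySem.Int.mod_eq_zero_iff_dvd]
      constructor
      · intro h; exact_mod_cast Int.natAbs_dvd.mpr h
      · intro h; exact Int.natAbs_dvd.mp (by exact_mod_cast h)
    simp only [List.foldl_cons, List.foldl_nil]
    split_ifs with h1 h2 h2 <;> simp_all [Array.toList_push]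
theorem len_wotsN (a : Nat) (ha : 0 < a) (n : Nat) : (wotsN a n).length = n + n / a := by
  induction n with
  | zero => simp [wotsN]
  | succ n ih =>
    rw [wotsN, List.length_append, ih, Nat.succ_div]
    split_ifs with h <;> simp <;> omega
theorem get_wotsN (a : Nat) (ha : 0 < a) (n p : Nat) (hp : p < n + n / a) :
    (wotsN a n)[p]? = some (if p % (a + 1) = a then 'Q' else 'W') := by
  induction n with
  | zero => simp [wotsN] at hp
  | succ n ih =>
    rw [wotsN]
    rcases lt_trichotomy p (n + n / a) with h | h | h
    · rw [List.getElem?_append_left (by rw [len_wotsN a ha]; exact h), ih h]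
    · subst h
      rw [show n + n / a = (wotsN a n).length from (len_wotsN a ha n).symm]
      rw [List.getElem?_append_right (le_refl _), Nat.sub_self]
      have hmod : (n + n / a) % (a + 1) = n % a := by
        have hd := Nat.div_add_mod n a
        have hr := Nat.mod_lt n ha
        have hc : a * (n / a) = (n / a) * a := Nat.mul_comm _ _
        have h1 : (a + 1) * (n / a) = (n / a) * a + n / a := by ring
        have : n + n / a = (a + 1) * (n / a) + n % a := by omega
        rw [this, Nat.mul_add_mod, Nat.mod_eq_of_lt (by omega)]
      have hne : (n + n / a) % (a + 1) ≠ a := by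
        rw [hmod]; have := Nat.mod_lt n ha; omega
      simp
      rw [len_wotsN a ha]; exact hne
    · have hlen := len_wotsN a ha n
      have hdvd : a ∣ (n + 1) := by
        by_contra hnd
        have : (n + 1) / a = n / a := by
          rw [Nat.succ_div]; simp [hnd]
        omega
      obtain ⟨b, hb⟩ := hdvd
      have hb1 : 1 ≤ b := by nlinarith
      obtain ⟨c, rfl⟩ : ∃ c, b = c + 1 := ⟨b - 1, by omega⟩
      have hn : n = a * c + (a - 1) := by
        have : a * (c + 1) = a * c + a := by ring
        omega
      have hdiv : n / a = c := by
        rw [hn, Nat.mul_add_div ha, Nat.div_eq_of_lt (by omega)]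
        omega
      have hp' : p = n + n / a + 1 := by
        have h2 : (n + 1) / a = n / a + 1 := by
          rw [Nat.succ_div, if_pos ⟨c + 1, hb⟩]
        omega
      subst hp'
      rw [show n + n / a = (wotsN a n).length from hlen.symm]
      rw [List.getElem?_append_right (by omega)]
      have hq : (wotsN a n).length + 1 - (wotsN a n).length = 1 := by omega
      rw [hq]
      have hpm : ((wotsN a n).length + 1) % (a + 1) = a := by
        rw [hlen, hdiv, hn]
        have h1 : (a + 1) * c = a * c + c := by ring
        have : a * c + (a - 1) + c + 1 = (a + 1) * c + a := by omega
        rw [this, Nat.mul_add_mod, Nat.mod_eq_of_lt (by omega)]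
      have hdv : a ∣ (n+1) := ⟨c+1, hb⟩
      simp [hpm, hdv]
theorem last_wotsN (a : Nat) (n : Nat) (hn : 0 < n) :
    (wotsN a n).getLast? = some (if a ∣ n then 'Q' else 'W') := by
  cases n with
  | zero => omega
  | succ m =>
    rw [wotsN]
    split_ifs with h <;> simp [List.getLast?_append]

theorem endswith_singleton (l : List Char) (c : Char) :
    PySem.Chars.endswith l [c] = true ↔ l.getLast? = some c := by
  rw [PySem.Chars.endswith_iff]
  constructor
  · rintro ⟨t, rfl⟩; simp [List.getLast?_append]
  · intro h
    obtain ⟨l', rfl⟩ := List.getLast?_eq_some_iff.mp h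
    exact ⟨l', rfl⟩

-- the characterization
theorem orderA_char (I0 W0 q : Int) (hq : 1 ≤ W0 → q ≠ 0) :
    ((pvOrderA I0 W0 q).length : Int) = pvLen I0 W0 q ∧
    (∀ p : Nat, (p : Int) < pvLen I0 W0 q →
      (pvOrderA I0 W0 q)[p]? = some (if p < I0.toNat then 'Q'
        else if (p - I0.toNat) % (q.natAbs + 1) = q.natAbs then 'Q' else 'W')) := by
  rcases le_or_gt W0 0 with hW | hW
  · -- no wots: order = replicate I0.toNat 'Q', maybe stripped
    have hrange : PySem.List.pyRange 1 (W0 + 1) 1 = [] := PySem.List.pyRange_one_eq_nil (by omega)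
    have ho1 : pvOrderA I0 W0 q =
        (if PySem.Chars.endswith (List.replicate I0.toNat 'Q') ['Q'] then
          PySem.List.slice (List.replicate I0.toNat 'Q') none (some (-1))
        else List.replicate I0.toNat 'Q') := by
      simp only [pvOrderA]
      rw [hrange]
      simp only [List.foldl_nil]
      rw [foldQ_eq]
      simp [PySem.List.length_pyRange_one]
    have hlen : pvLen I0 W0 q = max (max I0 0 - 1) 0 := by
      unfold pvLen
      rw [if_pos (by omega)]
    rcases Nat.eq_zero_or_pos I0.toNat with h0 | h0
    · rw [ho1, h0, hlen]
      constructor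
      · have : PySem.Chars.endswith (List.replicate 0 'Q') ['Q'] = false := by decide
        rw [this]
        simp
        omega
      · intro p hp
        have : max (max I0 0 - 1) 0 = 0 := by omega
        rw [this] at hp
        omega
    · have hend : PySem.Chars.endswith (List.replicate I0.toNat 'Q') ['Q'] = true := by
        rw [endswith_singleton]
        cases hI : I0.toNat with
        | zero => omega
        | succ m => simp [List.replicate_succ']
      rw [ho1, hend, if_pos rfl, PySem.List.slice_to_neg_one, List.dropLast_eq_take]
      constructor
      · rw [hlen]
        simp [List.length_take]
        omega
      · intro p hp
        rw [hlen] at hp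
        have hpn : p < I0.toNat - 1 := by omega
        rw [List.getElem?_take_of_lt (by simpa using hpn),
          List.getElem?_replicate_of_lt (by omega), if_pos (show p < I0.toNat by omega)]
  · -- W0 ≥ 1
    have hqne := hq (by omega)
    obtain ⟨a, haq⟩ : ∃ a : Nat, q.natAbs = a := ⟨_, rfl⟩
    rw [haq]
    have ha : 0 < a := haq ▸ Int.natAbs_pos.mpr hqne
    obtain ⟨W, hWeq⟩ : ∃ W : Nat, W0 = (W : Int) := ⟨W0.toNat, (Int.toNat_of_nonneg (by omega)).symm⟩
    have hWpos : 0 < W := by omega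
    have hfullo : pvOrderA I0 W0 q =
        (if PySem.Chars.endswith (List.replicate I0.toNat 'Q' ++ wotsN a W) ['Q'] then
          PySem.List.slice (List.replicate I0.toNat 'Q' ++ wotsN a W) none (some (-1))
        else List.replicate I0.toNat 'Q' ++ wotsN a W) := by
      simp only [pvOrderA]
      rw [hWeq, foldW_eq, haq, foldQ_eq]
      simp only [Array.toList_empty, List.nil_append, PySem.List.length_pyRange_one]
      rw [show (I0 - 0).toNat = I0.toNat by omega]
    have hflen : (List.replicate I0.toNat 'Q' ++ wotsN a W).length
        = I0.toNat + W + W / a := by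
      rw [List.length_append, List.length_replicate, len_wotsN _ ha]; omega
    have hlast : (List.replicate I0.toNat 'Q' ++ wotsN a W).getLast?
        = some (if a ∣ W then 'Q' else 'W') := by
      rw [List.getLast?_append, last_wotsN _ W hWpos]
      rfl
    have hLval := pvLen_pos I0 W0 q (by omega) W a hWeq haq
    have hgetfull : ∀ p : Nat, p < I0.toNat + W + W / a →
        (List.replicate I0.toNat 'Q' ++ wotsN a W)[p]?
          = some (if p < I0.toNat then 'Q'
              else if (p - I0.toNat) % (a + 1) = a then 'Q' else 'W') := by
      intro p hp
      rcases lt_or_ge p I0.toNat with h | h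
      · rw [List.getElem?_append_left (by simpa using h), List.getElem?_replicate_of_lt h, if_pos h]
      · rw [List.getElem?_append_right (by simpa using h)]
        simp only [List.length_replicate]
        rw [get_wotsN _ ha W (p - I0.toNat) (by omega),
          if_neg (show ¬ p < I0.toNat by omega)]
    by_cases hdvd : a ∣ W
    · have hend : PySem.Chars.endswith (List.replicate I0.toNat 'Q' ++ wotsN a W) ['Q'] = true := by
        rw [endswith_singleton, hlast, if_pos hdvd]
      rw [hfullo, hend, if_pos rfl, PySem.List.slice_to_neg_one, List.dropLast_eq_take]
      have hWd : 1 ≤ W / a := Nat.one_le_div_iff ha |>.mpr (Nat.le_of_dvd hWpos hdvd)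
      constructor
      · rw [hLval, if_pos hdvd]
        simp only [List.length_take, hflen]
        omega
      · intro p hp
        rw [hLval, if_pos hdvd] at hp
        have hpn : p < I0.toNat + W + W / a - 1 := by omega
        rw [List.getElem?_take_of_lt (by rw [hflen]; omega)]
        exact hgetfull p (by omega)
    · have hend : PySem.Chars.endswith (List.replicate I0.toNat 'Q' ++ wotsN a W) ['Q'] = false := by
        rw [Bool.eq_false_iff]
        intro hc
        rw [endswith_singleton, hlast, if_neg hdvd] at hc
        simp at hc
      rw [hfullo, hend]
      simp only [Bool.false_eq_true, if_false]
      constructor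
      · rw [hLval, if_neg hdvd, hflen]; omega
      · intro p hp
        rw [hLval, if_neg hdvd] at hp
        exact hgetfull p (by omega)

theorem altB_char (ct I0 W0 q : Int) (hq : 1 ≤ W0 → q ≠ 0) (h0 : 0 ≤ ct) :
    get_next_task_type_py_alt ct I0 W0 q =
      (if ct < pvLen I0 W0 q then
        some (String.ofList [if ct.toNat < I0.toNat then 'Q'
          else if (ct.toNat - I0.toNat) % (q.natAbs + 1) = q.natAbs then 'Q' else 'W'])
      else none) := by
  obtain ⟨p, rfl⟩ : ∃ p : Nat, ct = (p : Int) := ⟨ct.toNat, (Int.toNat_of_nonneg h0).symm⟩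
  simp only [Int.toNat_natCast]
  rcases le_or_gt W0 0 with hW | hW
  · have hw0 : max W0 0 = 0 := by omega
    have hlen : pvLen I0 W0 q = max (max I0 0 - 1) 0 := by
      unfold pvLen; rw [if_pos hw0]
    simp only [get_next_task_type_py_alt]
    rw [hw0, if_pos rfl, hlen]
    by_cases hc : (p : Int) < max (max I0 0 - 1) 0
    · rw [if_pos ⟨by omega, by omega⟩, if_pos hc,
        if_pos (show p < I0.toNat by omega)]
    · rw [if_neg (by omega), if_neg hc]
  · have hqne := hq (by omega)
    obtain ⟨a, haq⟩ : ∃ a : Nat, q.natAbs = a := ⟨_, rfl⟩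
    rw [haq]
    have ha : 0 < a := haq ▸ Int.natAbs_pos.mpr hqne
    obtain ⟨W, hWeq⟩ : ∃ W : Nat, W0 = (W : Int) := ⟨W0.toNat, (Int.toNat_of_nonneg (by omega)).symm⟩
    have hL := pvLen_pos I0 W0 q hW W a hWeq haq
    have habs : |q| = (a : Int) := by rw [Int.abs_eq_natAbs, haq]
    have hfd : PySem.Int.floordiv (max W0 0) |q| = ((W / a : Nat) : Int) := by
      rw [show max W0 0 = ((W : Nat) : Int) by omega, habs, PySem.Int.floordiv_natCast]
    have hmd : PySem.Int.mod (max W0 0) |q| = ((W % a : Nat) : Int) := by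
      rw [show max W0 0 = ((W : Nat) : Int) by omega, habs, PySem.Int.mod_natCast]
    simp only [get_next_task_type_py_alt]
    rw [if_neg (by omega), hfd, hmd]
    have hiteq : (if ((W % a : Nat) : Int) = 0 then (1:Int) else 0) = (if a ∣ W then 1 else 0) := by
      by_cases hd : a ∣ W
      · rw [if_pos hd, if_pos (by exact_mod_cast Nat.mod_eq_zero_of_dvd hd)]
      · rw [if_neg hd, if_neg (by
          intro hc
          exact hd (Nat.dvd_of_mod_eq_zero (by exact_mod_cast hc)))]
    rw [hiteq]
    have hLeq : max I0 0 + max W0 0 + ((W / a : Nat) : Int) - (if a ∣ W then 1 else 0)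
        = pvLen I0 W0 q := by
      rw [hL, show max I0 0 = (I0.toNat : Int) by omega, show max W0 0 = (W : Int) by omega]
    rw [hLeq]
    by_cases hc : (p : Int) < pvLen I0 W0 q
    · rw [if_neg (by simp; omega), if_pos hc]
      by_cases hq1 : (p : Int) < max I0 0
      · rw [if_pos hq1, if_pos (show p < I0.toNat by omega)]
      · rw [if_neg hq1, if_neg (show ¬ p < I0.toNat by omega)]
        have hsub : (p : Int) - max I0 0 = ((p - I0.toNat : Nat) : Int) := by
          push_cast; omega
        have hmm : PySem.Int.mod ((p - I0.toNat : Nat) : Int) (((a + 1 : Nat)) : Int)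
            = (((p - I0.toNat) % (a + 1) : Nat) : Int) := PySem.Int.mod_natCast _ _
        rw [hsub, habs, show ((a : Nat) : Int) + 1 = ((a + 1 : Nat) : Int) by push_cast; ring, hmm]
        by_cases he : (p - I0.toNat) % (a + 1) = a
        · rw [if_pos (by exact_mod_cast he), if_pos he]
        · rw [if_neg (by
            intro hc2
            exact he (by exact_mod_cast hc2)), if_neg he]
    · rw [if_pos (by simp; omega), if_neg hc]

theorem altB_neg (ct I0 W0 q : Int) (h0 : ct < 0) :
    get_next_task_type_py_alt ct I0 W0 q = none := by
  simp only [get_next_task_type_py_alt]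
  split_ifs with h1 h2 h3 <;> first | rfl | omega | (exfalso; omega)

-- ===== VERDICT (by name: the statement is the Claim_ definition above) =====
theorem get_next_task_type_py_spec : Claim_unchanged_get_next_task_type_py := by
  intro ct I0 W0 q _ hPre
  unfold Spec_get_next_task_type_py
  intro hnD
  unfold D_get_next_task_type_py at hnD
  have h0 : 0 ≤ ct := by omega
  obtain ⟨hL, hget⟩ := orderA_char I0 W0 q hPre.1
  rw [altB_char ct I0 W0 q hPre.1 h0]
  obtain ⟨p, rfl⟩ : ∃ p : Nat, ct = (p : Int) := ⟨ct.toNat, (Int.toNat_of_nonneg h0).symm⟩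
  simp only [get_next_task_type_py]
  by_cases hc : (p : Int) < pvLen I0 W0 q
  · rw [if_pos (by rw [hL]; exact hc), if_pos hc, PySem.List.pyGet?_natCast,
      hget p hc]
    simp
    rfl
  · rw [if_neg (by rw [hL]; exact hc), if_neg hc]
theorem get_next_task_type_py_changed : Claim_changed_get_next_task_type_py := by
  unfold Claim_changed_get_next_task_type_py; decide
theorem get_next_task_type_py_tight : Claim_exact_get_next_task_type_py := by
  intro ct I0 W0 q _ hPre hD
  unfold D_get_next_task_type_py at hD
  unfold Pre_get_next_task_type_py at hPre
  obtain ⟨hL, -⟩ := orderA_char I0 W0 q hPre.1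
  rw [altB_neg ct I0 W0 q hD]
  simp only [get_next_task_type_py]
  rw [if_pos (by omega)]
  intro hc
  have hnone : PySem.List.pyGet? (pvOrderA I0 W0 q) ct = none := by
    cases hx : PySem.List.pyGet? (pvOrderA I0 W0 q) ct with
    | none => rfl
    | some c => rw [hx] at hc; simp at hc
  rw [PySem.List.pyGet?_eq_none_iff] at hnone
  exact hnone ⟨by omega, by omega⟩
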